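-- pv_equiv track=rewrite | github.com/Batcastle/personal-scripts | other/Fallout_Term_Cracker.py | make_suggestion
-- ===== SOURCE A (Python) =====
-- def __find_largest__(array):
--     largest = array[0]
--     index = 0
--     current_index = 0
--     for each in array:
--         if each == array[0]:
--             current_index += 1
--             continue
--         elif largest < each:
--             largest = each
--             index = current_index
--         current_index += 1
--     return (largest, index)
--
-- def make_suggestion(passwords):
--     scores = []
--     current_score = 0
--     for each in passwords:
--         for each1 in passwords:
--             if each == each1:
--                 continue
--             elif each[0] == each1[0]:
--                 current_score += 1
--             if each[-1] == each1[-1]: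
--                 current_score += 1
--         scores.append(current_score)
--         current_score = 0
--     best_chance = __find_largest__(scores)
--     return (passwords[best_chance[1]], best_chance[0])
-- ===== SOURCE B (Python) =====
-- def make_suggestion(passwords):
--     # one pass of counting, one pass of scoring (A is O(n^2 * L); this is O(n * L))
--     first = {}
--     for p in passwords:
--         first[p[0]] = first.get(p[0], 0) + 1
--     last = {}
--     for p in passwords:
--         last[p[-1]] = last.get(p[-1], 0) + 1
--     dup = {}
--     for p in passwords:
--         dup[p] = dup.get(p, 0) + 1
--     best_p, best_s = passwords[0], None
--     for p in passwords:
--         s = first[p[0]] + last[p[-1]] - 2 * dup[p]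
--         if best_s is None or s > best_s:
--             best_p, best_s = p, s
--     return (best_p, best_s)
-- ===== Notes on version B (the rewrite author's own statement) =====
-- stated objective: faster
-- what changed: A scores each password by scanning the whole list again (all pairs); B builds first-char, last-char and exact-duplicate counters in single passes and scores each password from the counters in one pass, picking the first maximum on the fly.
-- outside the precondition, e.g. on make_suggestion(['']): A returns ('', 0), B raises IndexError
import Mathlib
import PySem

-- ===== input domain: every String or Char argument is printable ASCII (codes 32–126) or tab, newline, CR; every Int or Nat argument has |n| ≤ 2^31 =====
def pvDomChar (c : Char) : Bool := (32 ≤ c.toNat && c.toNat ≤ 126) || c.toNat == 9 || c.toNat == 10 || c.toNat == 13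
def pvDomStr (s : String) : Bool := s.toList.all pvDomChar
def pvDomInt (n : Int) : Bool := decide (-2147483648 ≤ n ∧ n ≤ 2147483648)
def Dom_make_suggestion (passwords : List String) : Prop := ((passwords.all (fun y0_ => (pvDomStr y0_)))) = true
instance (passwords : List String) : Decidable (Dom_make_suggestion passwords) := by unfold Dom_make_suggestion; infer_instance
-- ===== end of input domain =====

-- B replaces A's quadratic all-pairs scoring by first-char/last-char/duplicate counters built in
-- single passes, then scores each password in one pass (objective: faster).

-- ===== PORT A =====
-- p[0] and p[-1]
def pvFirst (p : String) : Option Char := PySem.Str.pyGet? p 0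
def pvLast (p : String) : Option Char := PySem.Str.pyGet? p (-1)

-- __find_largest__
def pvFindLargest (array : List Int) : Int × Int :=
  let a0 := (PySem.List.pyGet? array 0).getD 0   -- array[0]; Pre_ makes the list non-empty
  let st := array.foldl (fun (s : Int × Int × Int) each =>
      if each = a0 then (s.1, s.2.1, s.2.2 + 1)
      else if s.1 < each then (each, s.2.2, s.2.2 + 1)
      else (s.1, s.2.1, s.2.2 + 1)) (a0, 0, 0)
  (st.1, st.2.1)

-- the inner loop of make_suggestion (current_score is reset to 0 for each outer element)
def pvScore (passwords : List String) (each : String) : Int :=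
  passwords.foldl (fun cs each1 =>
    if each = each1 then cs
    else
      let cs := if pvFirst each = pvFirst each1 then cs + 1 else cs
      if pvLast each = pvLast each1 then cs + 1 else cs) 0

def make_suggestion (passwords : List String) : String × Int :=
  let scores := passwords.foldl (fun acc each => acc ++ [pvScore passwords each]) []
  let bc := pvFindLargest scores
  ((PySem.List.pyGet? passwords bc.2).getD "", bc.1)   -- passwords[best_chance[1]]

-- ===== PORT B =====
-- p[0] / p[-1] as a Char (Pre_ makes every string non-empty, so the default is never used)
def pvHead (p : String) : Char := (PySem.Str.pyGet? p 0).getD ' '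
def pvTail (p : String) : Char := (PySem.Str.pyGet? p (-1)).getD ' '

def make_suggestion_alt (passwords : List String) : String × Int :=
  let first := passwords.foldl (fun d p => d.insert (pvHead p) (d.getD (pvHead p) 0 + 1))
      (PySem.Dict.empty : PySem.Dict Char Int)
  let last := passwords.foldl (fun d p => d.insert (pvTail p) (d.getD (pvTail p) 0 + 1))
      (PySem.Dict.empty : PySem.Dict Char Int)
  let dup := passwords.foldl (fun d p => d.insert p (d.getD p 0 + 1))
      (PySem.Dict.empty : PySem.Dict String Int)
  let st := passwords.foldl (fun (st : String × Option Int) p =>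
      let s := first.getD (pvHead p) 0 + last.getD (pvTail p) 0 - 2 * dup.getD p 0
      match st.2 with
      | none => (p, some s)
      | some b => if b < s then (p, some s) else st)
    (passwords.headD "", none)
  (st.1, st.2.getD 0)

-- ===== PRECONDITION & SPEC =====
-- Pre_ excludes the empty list (A raises IndexError at array[0]) and lists containing an empty password:
-- on those A usually raises IndexError at each[0], except when every element is '' (the pair loop never
-- indexes and A returns ('', 0)); B's counter pass indexes p[0] unconditionally and raises IndexError there.
def Pre_make_suggestion (passwords : List String) : Prop :=
  passwords ≠ [] ∧ ∀ p ∈ passwords, p ≠ ""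
instance (passwords : List String) : Decidable (Pre_make_suggestion passwords) := by
  unfold Pre_make_suggestion; infer_instance
def pvWitness_make_suggestion : List String := ["ab", "cb", "ad"]

def Spec_make_suggestion (passwords : List String) (out : String × Int) : Prop := out = make_suggestion_alt passwords
instance (passwords : List String) (out : String × Int) : Decidable (Spec_make_suggestion passwords out) := by unfold Spec_make_suggestion; infer_instance

-- ===== CLAIM (what is proved, stated in full; the proofs are below) =====
def Claim_equal_make_suggestion : Prop := ∀ (passwords : List String), Dom_make_suggestion passwords → Pre_make_suggestion passwords → Spec_make_suggestion passwords (make_suggestion passwords)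

-- ===== LEMMAS AND PROOFS =====

theorem toList_ne_nil_of_ne_empty {s : String} (h : s ≠ "") : s.toList ≠ [] := by
  intro hl
  exact h (by simpa using congrArg String.ofList hl)

theorem pvFirst_nonempty {s : String} (h : s ≠ "") : pvFirst s = some (pvHead s) := by
  have := toList_ne_nil_of_ne_empty h
  cases hl : s.toList with
  | nil => exact absurd hl this
  | cons c cs => simp [pvFirst, pvHead, hl]

theorem pvLast_nonempty {s : String} (h : s ≠ "") : pvLast s = some (pvTail s) := by
  have hne := toList_ne_nil_of_ne_empty h
  simp [pvLast, pvTail, PySem.List.pyGet?_neg_one, List.getLast?_eq_some_getLast hne]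

theorem foldl_append_singleton {α β : Type} (g : α → β) (l : List α) (acc : List β) :
    l.foldl (fun acc e => acc ++ [g e]) acc = acc ++ l.map g := by
  induction l generalizing acc with
  | nil => simp
  | cons x xs ih => simp [ih]

theorem score_loop (p : String) (hp : p ≠ "") (l : List String) (hl : ∀ q ∈ l, q ≠ "") (cs : Int) :
    l.foldl (fun cs each1 =>
      if p = each1 then cs
      else
        let cs := if pvFirst p = pvFirst each1 then cs + 1 else cs
        if pvLast p = pvLast each1 then cs + 1 else cs) cs
    = cs + ((l.map pvHead).count (pvHead p) : Int) + ((l.map pvTail).count (pvTail p) : Int)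
        - 2 * (l.count p : Int) := by
  induction l generalizing cs with
  | nil => simp
  | cons q rest ih =>
    have hq : q ≠ "" := hl q (by simp)
    have hrest : ∀ r ∈ rest, r ≠ "" := fun r hr => hl r (by simp [hr])
    have hfirst : (pvFirst p = pvFirst q) ↔ (pvHead q = pvHead p) := by
      rw [pvFirst_nonempty hp, pvFirst_nonempty hq]
      constructor <;> intro h <;> simp_all
    have hlast : (pvLast p = pvLast q) ↔ (pvTail q = pvTail p) := by
      rw [pvLast_nonempty hp, pvLast_nonempty hq]
      constructor <;> intro h <;> simp_all
    by_cases hpq : p = q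
    · subst hpq
      rw [List.foldl_cons, if_pos rfl, ih hrest]
      simp only [List.map_cons, List.count_cons_self]
      push_cast
      ring
    · have hqp : q ≠ p := fun h => hpq h.symm
      simp only [List.foldl_cons, if_neg hpq, List.map_cons, List.count_cons, ih hrest]
      by_cases h1 : pvHead q = pvHead p <;> by_cases h2 : pvTail q = pvTail p <;>
        simp [hfirst, hlast, h1, h2, hqp] <;> push_cast <;> ring

theorem countD_fold {κ : Type} [BEq κ] [LawfulBEq κ] (key : String → κ) (l : List String) (k : κ) :
    (l.foldl (fun d p => d.insert (key p) (d.getD (key p) 0 + 1))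
      (PySem.Dict.empty : PySem.Dict κ Int)).getD k 0 = ((l.map key).count k : Int) := by
  have h : l.foldl (fun d p => d.insert (key p) (d.getD (key p) 0 + 1))
      (PySem.Dict.empty : PySem.Dict κ Int)
      = (l.map key).foldl (fun d x => d.insert x (d.getD x 0 + 1)) PySem.Dict.empty := by
    rw [List.foldl_map]
  rw [h, PySem.Dict.getD_foldl_insert_add_one]
  simp

theorem countD_first (ps : List String) (k : Char) :
    (ps.foldl (fun d p => d.insert (pvHead p) (d.getD (pvHead p) 0 + 1))
      (PySem.Dict.empty : PySem.Dict Char Int)).getD k 0 = ((ps.map pvHead).count k : Int) :=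
  countD_fold pvHead ps k

theorem countD_last (ps : List String) (k : Char) :
    (ps.foldl (fun d p => d.insert (pvTail p) (d.getD (pvTail p) 0 + 1))
      (PySem.Dict.empty : PySem.Dict Char Int)).getD k 0 = ((ps.map pvTail).count k : Int) :=
  countD_fold pvTail ps k

theorem countD_dup (ps : List String) (k : String) :
    (ps.foldl (fun d p => d.insert p (d.getD p 0 + 1))
      (PySem.Dict.empty : PySem.Dict String Int)).getD k 0 = (ps.count k : Int) := by
  have h := countD_fold (fun p => p) ps k
  simpa using h

-- the two selection loops, run in lockstep over the same suffix of the password list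
theorem sel_loop (f : String → Int) (a0 : Int) (ps pre l : List String)
    (largest idx : Int) (bp : String)
    (hsplit : ps = pre ++ l)
    (hbp : PySem.List.pyGet? ps idx = some bp)
    (hlb : a0 ≤ largest) :
    (fun stA stB => stB = ((PySem.List.pyGet? ps stA.2.1).getD "", some stA.1))
      ((l.map f).foldl (fun (s : Int × Int × Int) each =>
          if each = a0 then (s.1, s.2.1, s.2.2 + 1)
          else if s.1 < each then (each, s.2.2, s.2.2 + 1)
          else (s.1, s.2.1, s.2.2 + 1)) (largest, idx, (pre.length : Int)))
      (l.foldl (fun (st : String × Option Int) p =>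
          match st.2 with
          | none => (p, some (f p))
          | some b => if b < f p then (p, some (f p)) else st) (bp, some largest)) := by
  induction l generalizing pre largest idx bp with
  | nil => simp [hbp]
  | cons p rest ih =>
    have hget : PySem.List.pyGet? ps (pre.length : Int) = some p := by
      rw [hsplit]; exact PySem.List.pyGet?_append_length pre rest p
    have hsplit' : ps = (pre ++ [p]) ++ rest := by simp [hsplit]
    have hlen' : ((pre ++ [p]).length : Int) = (pre.length : Int) + 1 := by simp
    by_cases h0 : f p = a0
    · simp only [List.map_cons, List.foldl_cons, if_pos h0]
      have hnot : ¬ largest < f p := by omega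
      simp only [if_neg hnot]
      have h := ih (pre ++ [p]) largest idx bp hsplit' hbp hlb
      rwa [hlen'] at h
    · by_cases h1 : largest < f p
      · simp only [List.map_cons, List.foldl_cons, if_neg h0, if_pos h1]
        have h := ih (pre ++ [p]) (f p) (pre.length : Int) p hsplit' hget (by omega)
        rwa [hlen'] at h
      · simp only [List.map_cons, List.foldl_cons, if_neg h0, if_neg h1]
        have h := ih (pre ++ [p]) largest idx bp hsplit' hbp hlb
        rwa [hlen'] at h

theorem main_sel (f : String → Int) (p0 : String) (rest : List String) :
    (((PySem.List.pyGet? (p0 :: rest) (pvFindLargest ((p0 :: rest).map f)).2).getD "",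
      (pvFindLargest ((p0 :: rest).map f)).1) : String × Int)
    = (let st := (p0 :: rest).foldl (fun (st : String × Option Int) p =>
          match st.2 with
          | none => (p, some (f p))
          | some b => if b < f p then (p, some (f p)) else st) ((p0 :: rest).headD "", none);
       (st.1, st.2.getD 0)) := by
  have hbp : PySem.List.pyGet? (p0 :: rest) (0 : Int) = some p0 := by
    exact PySem.List.pyGet?_zero_cons (x := p0) (xs := rest)
  have h := sel_loop f (f p0) (p0 :: rest) [p0] rest (f p0) 0 p0 (by simp) hbp le_rfl
  simp only [List.length_cons, List.length_nil, Nat.cast_one, zero_add] at h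
  simp only [pvFindLargest, List.map_cons, List.foldl_cons, PySem.List.pyGet?_zero_cons,
    Option.getD_some, List.headD_cons, if_pos, zero_add]
  rw [h]
  rfl

-- ===== VERDICT (by name: the statement is the Claim_ definition above) =====
theorem make_suggestion_spec : Claim_equal_make_suggestion := by
  intro passwords _ hpre
  obtain ⟨hne, hall⟩ := hpre
  obtain ⟨p0, rest, rfl⟩ : ∃ p0 rest, passwords = p0 :: rest := by
    cases passwords with
    | nil => exact absurd rfl hne
    | cons a b => exact ⟨a, b, rfl⟩
  unfold Spec_make_suggestion
  have hA : make_suggestion (p0 :: rest)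
      = ((PySem.List.pyGet? (p0 :: rest)
            (pvFindLargest ((p0 :: rest).map (pvScore (p0 :: rest)))).2).getD "",
         (pvFindLargest ((p0 :: rest).map (pvScore (p0 :: rest)))).1) := by
    unfold make_suggestion
    rw [foldl_append_singleton (pvScore (p0 :: rest)) (p0 :: rest) []]
    rfl
  have hmap : (p0 :: rest).map (pvScore (p0 :: rest))
      = (p0 :: rest).map (fun p =>
          (((p0 :: rest).map pvHead).count (pvHead p) : Int)
            + (((p0 :: rest).map pvTail).count (pvTail p) : Int)
            - 2 * (((p0 :: rest).count p : Int))) := by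
    apply List.map_congr_left
    intro p hp
    have h := score_loop p (hall p hp) (p0 :: rest) hall 0
    simpa [pvScore] using h
  have hB : make_suggestion_alt (p0 :: rest)
      = (let st := (p0 :: rest).foldl (fun (st : String × Option Int) p =>
            match st.2 with
            | none => (p, some ((((p0 :: rest).map pvHead).count (pvHead p) : Int)
                + (((p0 :: rest).map pvTail).count (pvTail p) : Int)
                - 2 * (((p0 :: rest).count p : Int))))
            | some b => if b < ((((p0 :: rest).map pvHead).count (pvHead p) : Int)
                + (((p0 :: rest).map pvTail).count (pvTail p) : Int)
                - 2 * (((p0 :: rest).count p : Int)))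
                then (p, some ((((p0 :: rest).map pvHead).count (pvHead p) : Int)
                  + (((p0 :: rest).map pvTail).count (pvTail p) : Int)
                  - 2 * (((p0 :: rest).count p : Int)))) else st)
          ((p0 :: rest).headD "", none);
         (st.1, st.2.getD 0)) := by
    unfold make_suggestion_alt
    simp only [countD_first, countD_last, countD_dup]
  rw [hA, hmap, hB]
  exact main_sel (fun p =>
    (((p0 :: rest).map pvHead).count (pvHead p) : Int)
      + (((p0 :: rest).map pvTail).count (pvTail p) : Int)
      - 2 * (((p0 :: rest).count p : Int))) p0 rest
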